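-- pv_equiv track=rewrite | github.com/NhanHoThanh/dga_botnet_phishing_url_detection_extension | training/train_dga.py | longest_consecutive_consonants
-- ===== SOURCE A (Python) =====
-- CONSONANTS = set("bcdfghjklmnpqrstvwxyz")
--
-- def longest_consecutive_consonants(s: str) -> int:
--     """Length of the longest run of consecutive consonants."""
--     max_run = 0
--     current = 0
--     for ch in s.lower():
--         if ch in CONSONANTS:
--             current += 1
--             max_run = max(max_run, current)
--         else:
--             current = 0
--     return max_run
-- ===== SOURCE B (Python) =====
-- CONSONANTS = set("bcdfghjklmnpqrstvwxyz")
--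
-- def longest_consecutive_consonants(s: str) -> int:
--     """Length of the longest run of consecutive consonants: segment the
--     lowered string into maximal consonant runs with a two-pointer scan
--     and take the maximum run length."""
--     t = s.lower()
--     n = len(t)
--     best = 0
--     i = 0
--     while i < n:
--         if t[i] in CONSONANTS:
--             j = i
--             while j < n and t[j] in CONSONANTS:
--                 j += 1
--             best = max(best, j - i)
--             i = j
--         else:
--             i += 1
--     return best
-- ===== Notes on version B (the rewrite author's own statement) =====
-- stated objective: alternative
-- what changed: Replaced the per-character running-counter state machine (current/max_run updated at every char) with a segment-into-runs strategy: a two-pointer scan that jumps over each maximal consonant run at once and takes the max of run lengths.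
import Mathlib
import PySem

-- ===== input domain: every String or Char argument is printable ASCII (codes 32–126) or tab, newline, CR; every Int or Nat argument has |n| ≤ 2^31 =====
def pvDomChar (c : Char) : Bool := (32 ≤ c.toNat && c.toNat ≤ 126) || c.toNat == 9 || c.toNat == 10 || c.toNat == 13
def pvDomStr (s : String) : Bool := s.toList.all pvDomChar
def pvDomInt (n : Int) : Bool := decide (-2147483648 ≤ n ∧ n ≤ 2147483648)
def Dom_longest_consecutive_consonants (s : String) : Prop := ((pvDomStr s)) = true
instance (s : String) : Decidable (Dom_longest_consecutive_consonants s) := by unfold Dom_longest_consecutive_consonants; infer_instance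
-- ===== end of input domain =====

-- B replaces A's per-character running-counter state machine by a two-pointer scan
-- that jumps over each maximal consonant run at once (alternative decomposition, same cost).

-- ===== PORT A =====
def pvConsonants : List Char := "bcdfghjklmnpqrstvwxyz".toList

def pvIsCons (c : Char) : Bool := pvConsonants.contains c

-- the for-loop over s.lower() with state (max_run, current)
def longest_consecutive_consonants (s : String) : Int :=
  (((PySem.Str.lower s).toList.foldl
      (fun (st : Int × Int) ch =>
        if pvIsCons ch then (max st.1 (st.2 + 1), st.2 + 1) else (st.1, (0 : Int)))
      ((0 : Int), (0 : Int)))).1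

-- ===== PORT B =====
-- the outer while-loop: at a consonant, the inner while finds the run's end (takeWhile),
-- best is maxed with the run length, and i jumps past the run (dropWhile); else i += 1.
def pvBLoop (best : Int) : List Char → Int
  | [] => best
  | h :: t =>
    if hc : pvIsCons h then
      pvBLoop (max best (((h :: t).takeWhile pvIsCons).length : Int))
              ((h :: t).dropWhile pvIsCons)
    else
      pvBLoop best t
termination_by l => l.length
decreasing_by
  · simp [hc]
    exact List.length_dropWhile_le _ _
  · simp

def longest_consecutive_consonants_alt (s : String) : Int :=
  pvBLoop 0 (PySem.Str.lower s).toList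

-- ===== PRECONDITION & SPEC =====
def Spec_longest_consecutive_consonants (s : String) (out : Int) : Prop := out = longest_consecutive_consonants_alt s
instance (s : String) (out : Int) : Decidable (Spec_longest_consecutive_consonants s out) := by unfold Spec_longest_consecutive_consonants; infer_instance

-- ===== CLAIM (what is proved, stated in full; the proofs are below) =====
def Claim_equal_longest_consecutive_consonants : Prop := ∀ (s : String), Dom_longest_consecutive_consonants s → Spec_longest_consecutive_consonants s (longest_consecutive_consonants s)

-- ===== LEMMAS AND PROOFS =====

-- future contribution of A's loop given current run length c (A's loop minus the accumulator m)
def pvG (c : Int) : List Char → Int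
  | [] => 0
  | h :: t => if pvIsCons h then max (c + 1) (pvG (c + 1) t) else pvG 0 t

lemma pvFold_eq_g (l : List Char) : ∀ (m c : Int), 0 ≤ m →
    (l.foldl (fun (st : Int × Int) ch =>
        if pvIsCons ch then (max st.1 (st.2 + 1), st.2 + 1) else (st.1, (0 : Int))) (m, c)).1
      = max m (pvG c l) := by
  induction l with
  | nil => intro m c hm; simp [pvG]; omega
  | cons h t ih =>
    intro m c hm
    by_cases hc : pvIsCons h
    · simp only [List.foldl_cons, hc, if_true, pvG]
      rw [ih (max m (c + 1)) (c + 1) (by omega)]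
      omega
    · simp only [List.foldl_cons, hc, pvG]
      exact ih m 0 hm

lemma pvBLoop_max (l : List Char) : ∀ (b : Int), 0 ≤ b → pvBLoop b l = max b (pvBLoop 0 l) := by
  match l with
  | [] => intro b hb; simp only [pvBLoop]; omega
  | h :: t =>
    intro b hb
    by_cases hc : pvIsCons h
    · rw [pvBLoop, pvBLoop, dif_pos hc, dif_pos hc]
      have h1 := pvBLoop_max ((h :: t).dropWhile pvIsCons)
        (max b (((h :: t).takeWhile pvIsCons).length : Int)) (le_max_of_le_left hb)
      have h2 := pvBLoop_max ((h :: t).dropWhile pvIsCons)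
        (max 0 (((h :: t).takeWhile pvIsCons).length : Int)) (le_max_left 0 _)
      rw [h1, h2]
      omega
    · rw [pvBLoop, pvBLoop, dif_neg hc, dif_neg hc, pvBLoop_max t b hb]
termination_by l.length
decreasing_by
  all_goals simp [hc]
  all_goals exact List.length_dropWhile_le _ _

lemma pvG_eq (l : List Char) : ∀ (c : Int),
    pvG c l = (if h : ∃ x ∈ l.head?, pvIsCons x
               then max (c + ((l.takeWhile pvIsCons).length : Int)) (pvBLoop 0 (l.dropWhile pvIsCons))
               else pvBLoop 0 l) := by
  induction l with
  | nil => intro c; simp [pvG, pvBLoop]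
  | cons h t ih =>
    intro c
    by_cases hc : pvIsCons h
    · rw [dif_pos (by simp [hc])]
      simp only [pvG, hc, if_true, List.takeWhile_cons_of_pos hc, List.dropWhile_cons_of_pos hc]
      rw [ih (c + 1)]
      by_cases ht : ∃ x ∈ t.head?, pvIsCons x
      · rw [dif_pos ht]
        have hlen : 1 ≤ (t.takeWhile pvIsCons).length := by
          match t, ht with
          | x :: t', ht =>
            simp only [List.head?_cons, Option.mem_some_iff] at ht
            obtain ⟨y, hy, hx⟩ := ht
            simp [List.takeWhile_cons_of_pos (hy ▸ hx)]
        simp only [List.length_cons]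
        push_cast
        omega
      · rw [dif_neg ht]
        have hdrop : t.dropWhile pvIsCons = t := by
          match t with
          | [] => rfl
          | x :: t' =>
            have : ¬ pvIsCons x = true := by
              intro hx; exact ht ⟨x, by simp, hx⟩
            simp [this]
        have htake : t.takeWhile pvIsCons = [] := by
          match t with
          | [] => rfl
          | x :: t' =>
            have : ¬ pvIsCons x = true := by
              intro hx; exact ht ⟨x, by simp, hx⟩
            simp [this]
        rw [hdrop, htake]
        simp
    · rw [dif_neg (by simp [hc])]
      simp only [pvG, hc, Bool.false_eq_true, if_false]
      rw [ih 0]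
      by_cases ht : ∃ x ∈ t.head?, pvIsCons x
      · rw [dif_pos ht, pvBLoop, dif_neg hc]
        match t, ht with
        | x :: t', ht =>
          simp only [List.head?_cons, Option.mem_some_iff] at ht
          obtain ⟨y, hy, hx⟩ := ht
          subst hy
          rw [pvBLoop, dif_pos hx, pvBLoop_max _ _ (le_max_left 0 _),
              pvBLoop_max _ _ (by positivity)]
          have h0 : (0 : Int) ≤ ((List.takeWhile pvIsCons (x :: t')).length : Int) := by positivity
          omega
      · rw [dif_neg ht]
        simp [pvBLoop, hc]

-- ===== VERDICT (by name: the statement is the Claim_ definition above) =====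
theorem longest_consecutive_consonants_spec : Claim_equal_longest_consecutive_consonants := by
  intro s _
  unfold Spec_longest_consecutive_consonants longest_consecutive_consonants longest_consecutive_consonants_alt
  set l := (PySem.Str.lower s).toList with hl
  rw [pvFold_eq_g l 0 0 le_rfl, pvG_eq l 0]
  by_cases ht : ∃ x ∈ l.head?, pvIsCons x
  · rw [dif_pos ht]
    match l, ht with
    | x :: t', ht =>
      simp only [List.head?_cons, Option.mem_some_iff] at ht
      obtain ⟨y, hy, hx⟩ := ht
      subst hy
      rw [pvBLoop, dif_pos hx, pvBLoop_max _ _ (le_max_left 0 _),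
          pvBLoop_max _ _ (by positivity)]
      have h0 : (0 : Int) ≤ ((List.takeWhile pvIsCons (x :: t')).length : Int) := by positivity
      omega
  · rw [dif_neg ht]
    match l with
    | [] => simp [pvBLoop]
    | x :: t' =>
      have hx : ¬ pvIsCons x = true := by
        intro hx; exact ht ⟨x, by simp, hx⟩
      rw [pvBLoop, dif_neg hx, pvBLoop_max _ _ le_rfl]
      omega
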